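-- pv_equiv track=rewrite | github.com/DxTea/tinkoff_backend_academy_2024 | 3.py | count_coins
-- ===== SOURCE A (Python) =====
-- def lcg(e, a, m):
--     return (a * e + 11) % m
--
-- def generator(seed, a, m):
--     while True:
--         seed = lcg(seed, a, m)
--         yield (abs(seed % 3 - 1) * 5 + abs(seed % 3) * 2) % 8
--
-- def count_coins(n, k, a, m):
--     gen = generator(0, a, m)
--     coins = 0
--     candies = 0
--     total = 0
--     while candies < n:
--         coin = next(gen)
--         total += coin
--         coins += 1
--         while total >= 3 * k:
--             buy, total = divmod(total, 3)
--             if buy < k: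
--                 break
--             candies += buy
--     return coins
-- ===== SOURCE B (Python) =====
-- def count_coins(n, k, a, m):
--     # Cycle detection: state (seed, carry) at purchase boundaries repeats within
--     # O(m) macro steps; jump over whole cycles arithmetically, then finish by
--     # plain simulation of the remainder.
--     coins = 0
--     candies = 0
--     seed = 0
--     t = 0
--     seen = {}
--     while candies < n:
--         key = (seed, t)
--         if key in seen:
--             c0, d0 = seen[key]
--             dd = candies - d0
--             dc = coins - c0
--             j = (n - candies - 1) // dd
--             candies += j * dd
--             coins += j * dc
--             while candies < n:
--                 seed = (a * seed + 11) % m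
--                 t += (5, 2, 1)[seed % 3]
--                 coins += 1
--                 if t >= 3 * k:
--                     candies += t // 3
--                     t %= 3
--             break
--         seen[key] = (coins, candies)
--         while True:
--             seed = (a * seed + 11) % m
--             t += (5, 2, 1)[seed % 3]
--             coins += 1
--             if t >= 3 * k:
--                 candies += t // 3
--                 t %= 3
--                 break
--     return coins
-- ===== Notes on version B (the rewrite author's own statement) =====
-- stated objective: faster
-- what changed: B detects a cycle in the PRNG's (seed, carry) state at purchase boundaries via a dict and jumps over whole cycles arithmetically (coins/candies per period), simulating only the pre-period and the remainder, instead of A's coin-by-coin simulation; A's inner divmod-while collapses to a single purchase per crossing.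
import Mathlib
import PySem

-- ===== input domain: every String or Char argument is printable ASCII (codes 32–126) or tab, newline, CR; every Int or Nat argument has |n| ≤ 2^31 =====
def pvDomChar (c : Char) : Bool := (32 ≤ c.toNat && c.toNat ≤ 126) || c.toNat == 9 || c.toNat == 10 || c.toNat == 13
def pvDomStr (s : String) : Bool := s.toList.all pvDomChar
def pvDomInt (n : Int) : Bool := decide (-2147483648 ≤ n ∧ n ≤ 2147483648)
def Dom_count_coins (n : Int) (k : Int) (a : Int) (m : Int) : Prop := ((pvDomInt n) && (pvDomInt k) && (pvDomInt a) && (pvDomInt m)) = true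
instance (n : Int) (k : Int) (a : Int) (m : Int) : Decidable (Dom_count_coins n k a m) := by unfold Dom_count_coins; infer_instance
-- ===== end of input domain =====

-- B replaces A's coin-by-coin simulation by cycle detection on the (seed, carry) state at
-- purchase boundaries, jumping over whole cycles arithmetically (same return value on Pre_).

-- ===== PORT A =====
-- def lcg(e, a, m): return (a * e + 11) % m
def count_coins_lcg (e : Int) (a : Int) (m : Int) : Int := PySem.Int.mod (a * e + 11) m

-- inner 'while total >= 3 * k' loop; fuel 2 is exact on Pre_ (for k ≥ 1 the loop body runs at
-- most once); on fuel exhaustion (only reachable when the Python diverges, outside Pre_) it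
-- returns the loop state unchanged.
def count_coins_inner (k : Int) : Nat → Int → Int → Int × Int
  | 0, total, candies => (total, candies)
  | fuel + 1, total, candies =>
    if 3 * k ≤ total then
      -- buy, total = divmod(total, 3)
      let buy := PySem.Int.floordiv total 3
      let total' := PySem.Int.mod total 3
      if buy < k then (total', candies)                         -- break
      else count_coins_inner k fuel total' (candies + buy)       -- candies += buy
    else (total, candies)

-- outer 'while candies < n' loop; the generator's state is the seed, next(gen) advances it
-- by lcg and yields (abs(seed % 3 - 1) * 5 + abs(seed % 3) * 2) % 8
def count_coins_loop (n k a m : Int) : Nat → Int → Int → Int → Int → Int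
  | 0, _, coins, _, _ => coins
  | fuel + 1, seed, coins, total, candies =>
    if candies < n then
      let seed' := count_coins_lcg seed a m
      let coin := PySem.Int.mod (|PySem.Int.mod seed' 3 - 1| * 5 + |PySem.Int.mod seed' 3| * 2) 8
      let tc := count_coins_inner k 2 (total + coin) candies
      count_coins_loop n k a m fuel seed' (coins + 1) tc.1 tc.2
    else coins

-- fuel exceeds the number of outer iterations on every input of Pre_ (proved below); on the
-- inputs Pre_ excludes the Python raises or diverges, so the value there is junk.
def count_coins (n : Int) (k : Int) (a : Int) (m : Int) : Int :=
  count_coins_loop n k a m ((3 * (n + k) + 3).toNat + 1) 0 0 0 0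

-- ===== PORT B =====
-- final plain-simulation loop of Source B ('while candies < n' after the jump);
-- (5, 2, 1)[seed % 3] is pyGet?; the index is always in range since seed % 3 ∈ {0,1,2}
def count_coins_alt_final (n k a m : Int) : Nat → Int → Int → Int → Int → Int
  | 0, _, coins, _, _ => coins
  | fuel + 1, seed, coins, t, candies =>
    if candies < n then
      let seed' := PySem.Int.mod (a * seed + 11) m
      let t1 := t + (PySem.List.pyGet? [(5 : Int), 2, 1] (PySem.Int.mod seed' 3)).getD 0
      if 3 * k ≤ t1 then
        count_coins_alt_final n k a m fuel seed' (coins + 1) (PySem.Int.mod t1 3)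
          (candies + PySem.Int.floordiv t1 3)
      else
        count_coins_alt_final n k a m fuel seed' (coins + 1) t1 candies
    else coins

-- 'while True' loop of Source B: simulate coins until one purchase happens;
-- returns (seed, coins, t, candies); fuel exhaustion (unreachable on Pre_) returns the state
def count_coins_alt_macroStep (k a m : Int) : Nat → Int → Int → Int → Int → Int × Int × Int × Int
  | 0, seed, coins, t, candies => (seed, coins, t, candies)
  | fuel + 1, seed, coins, t, candies =>
    let seed' := PySem.Int.mod (a * seed + 11) m
    let t1 := t + (PySem.List.pyGet? [(5 : Int), 2, 1] (PySem.Int.mod seed' 3)).getD 0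
    if 3 * k ≤ t1 then (seed', coins + 1, PySem.Int.mod t1 3, candies + PySem.Int.floordiv t1 3)
    else count_coins_alt_macroStep k a m fuel seed' (coins + 1) t1 candies

-- outer 'while candies < n' loop of Source B with the 'seen' dict and the cycle jump
def count_coins_alt_macro (n k a m : Int) :
    Nat → PySem.Dict (Int × Int) (Int × Int) → Int → Int → Int → Int → Int
  | 0, _, _, coins, _, _ => coins
  | fuel + 1, seen, seed, coins, t, candies =>
    if candies < n then
      match seen.get? (seed, t) with
      | some cd =>
        let dd := candies - cd.2
        let dc := coins - cd.1
        let j := PySem.Int.floordiv (n - candies - 1) dd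
        count_coins_alt_final n k a m ((3 * (n + k) + 3).toNat + 1) seed (coins + j * dc) t
          (candies + j * dd)
      | none =>
        let r := count_coins_alt_macroStep k a m (3 * k + 3).toNat seed coins t candies
        count_coins_alt_macro n k a m fuel (seen.insert (seed, t) (coins, candies))
          r.1 r.2.1 r.2.2.1 r.2.2.2
    else coins

-- each loop's fuel exceeds its iteration count on Pre_ (proved below): the macro loop performs
-- at least one purchase (≥ 1 candy) per iteration, a macro step purchases within 3k coins,
-- and the final loop runs at most 3n + 3k coins
def count_coins_alt (n : Int) (k : Int) (a : Int) (m : Int) : Int :=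
  count_coins_alt_macro n k a m (n.toNat + 1) PySem.Dict.empty 0 0 0 0

-- ===== PRECONDITION & SPEC =====
-- Pre_ excludes exactly the inputs where the Python A does not return: m = 0 with n > 0 raises
-- ZeroDivisionError at the first next(gen), and k ≤ 0 with n > 0 makes the inner while loop
-- spin forever (total %= 3 keeps total ≥ 0 ≥ 3k and buy = 0 < n never breaks).
def Pre_count_coins (n : Int) (k : Int) (a : Int) (m : Int) : Prop := n ≤ 0 ∨ (1 ≤ k ∧ m ≠ 0)
instance (n : Int) (k : Int) (a : Int) (m : Int) : Decidable (Pre_count_coins n k a m) := by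
  unfold Pre_count_coins; infer_instance

def pvWitness_count_coins : Int × Int × Int × Int := (5, 2, 3, 7)

def Spec_count_coins (n : Int) (k : Int) (a : Int) (m : Int) (out : Int) : Prop := out = count_coins_alt n k a m
instance (n : Int) (k : Int) (a : Int) (m : Int) (out : Int) : Decidable (Spec_count_coins n k a m out) := by unfold Spec_count_coins; infer_instance

-- ===== CLAIM (what is proved, stated in full; the proofs are below) =====
def Claim_equal_count_coins : Prop := ∀ (n : Int) (k : Int) (a : Int) (m : Int), Dom_count_coins n k a m → Pre_count_coins n k a m → Spec_count_coins n k a m (count_coins n k a m)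

-- ===== LEMMAS AND PROOFS =====

-- the coin yielded by the generator after the seed advanced to s
def pcoin (s : Int) : Int :=
  PySem.Int.mod (|PySem.Int.mod s 3 - 1| * 5 + |PySem.Int.mod s 3| * 2) 8

theorem pcoin_bounds (s : Int) : 1 ≤ pcoin s ∧ pcoin s ≤ 5 := by
  have h0 : 0 ≤ PySem.Int.mod s 3 := PySem.Int.mod_nonneg s (by norm_num)
  have h3 : PySem.Int.mod s 3 < 3 := PySem.Int.mod_lt s (by norm_num)
  unfold pcoin
  interval_cases h : PySem.Int.mod s 3 <;> decide

theorem pcoin_lookup (s : Int) :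
    (PySem.List.pyGet? [(5 : Int), 2, 1] (PySem.Int.mod s 3)).getD 0 = pcoin s := by
  have h0 : 0 ≤ PySem.Int.mod s 3 := PySem.Int.mod_nonneg s (by norm_num)
  have h3 : PySem.Int.mod s 3 < 3 := PySem.Int.mod_lt s (by norm_num)
  unfold pcoin
  interval_cases h : PySem.Int.mod s 3 <;> decide

-- reference semantics shared by both ports: number of coins drawn, starting from generator
-- state seed and carry t, until 'needed' more candies have been bought (k ≥ 1; junk 0 if k ≤ 0)
def crun (k a m needed seed t : Int) : Int :=
  if needed ≤ 0 then 0
  else if k ≤ 0 then 0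
  else if 3 * k ≤ t + pcoin (PySem.Int.mod (a * seed + 11) m) then
    1 + crun k a m
      (needed - PySem.Int.floordiv (t + pcoin (PySem.Int.mod (a * seed + 11) m)) 3)
      (PySem.Int.mod (a * seed + 11) m)
      (PySem.Int.mod (t + pcoin (PySem.Int.mod (a * seed + 11) m)) 3)
  else 1 + crun k a m needed (PySem.Int.mod (a * seed + 11) m)
    (t + pcoin (PySem.Int.mod (a * seed + 11) m))
termination_by (needed.toNat, (3 * k - t).toNat)
decreasing_by
  · have hb : k ≤ PySem.Int.floordiv (t + pcoin (PySem.Int.mod (a * seed + 11) m)) 3 :=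
      (PySem.Int.le_floordiv_iff_mul_le (by norm_num)).2 (by omega)
    apply Prod.Lex.left
    omega
  · have hp := pcoin_bounds (PySem.Int.mod (a * seed + 11) m)
    apply Prod.Lex.right
    omega

theorem crun_nonneg (k a m needed seed t : Int) : 0 ≤ crun k a m needed seed t := by
  fun_induction crun k a m needed seed t <;> omega

theorem crun_le (k a m needed seed t : Int) :
    1 ≤ k → 0 ≤ t → t < 3 * k →
    crun k a m needed seed t ≤ if needed ≤ 0 then 0 else 3 * needed + 3 * k - t := by
  fun_induction crun k a m needed seed t with
  | case1 needed seed t h =>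
    intro _ _ _; simp [if_pos h]
  | case2 needed seed t h1 h2 =>
    intro hk _ _; omega
  | case3 needed seed t h1 h2 h3 ih =>
    intro hk h0 hlt
    have hp := pcoin_bounds (PySem.Int.mod (a * seed + 11) m)
    have hb : k ≤ PySem.Int.floordiv (t + pcoin (PySem.Int.mod (a * seed + 11) m)) 3 :=
      (PySem.Int.le_floordiv_iff_mul_le (by norm_num)).2 (by omega)
    have hm0 : 0 ≤ PySem.Int.mod (t + pcoin (PySem.Int.mod (a * seed + 11) m)) 3 :=
      PySem.Int.mod_nonneg _ (by norm_num)
    have hm3 : PySem.Int.mod (t + pcoin (PySem.Int.mod (a * seed + 11) m)) 3 < 3 :=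
      PySem.Int.mod_lt _ (by norm_num)
    have heq := PySem.Int.floordiv_mul_add_mod (t + pcoin (PySem.Int.mod (a * seed + 11) m)) 3
    specialize ih hk hm0 (by omega)
    rw [if_neg (by omega : ¬ needed ≤ 0)]
    split_ifs at ih <;> omega
  | case4 needed seed t h1 h2 h3 ih =>
    intro hk h0 hlt
    have hp := pcoin_bounds (PySem.Int.mod (a * seed + 11) m)
    specialize ih hk (by omega) (by omega)
    rw [if_neg (by omega : ¬ needed ≤ 0)]
    split_ifs at ih
    omega

theorem innerA (k total candies : Int) (hk : 1 ≤ k) :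
    count_coins_inner k 2 total candies =
      if 3 * k ≤ total then (PySem.Int.mod total 3, candies + PySem.Int.floordiv total 3)
      else (total, candies) := by
  by_cases h : 3 * k ≤ total
  · have hb : k ≤ PySem.Int.floordiv total 3 :=
      (PySem.Int.le_floordiv_iff_mul_le (by norm_num)).2 (by omega)
    have hm : PySem.Int.mod total 3 < 3 := PySem.Int.mod_lt total (by norm_num)
    show count_coins_inner k (1 + 1) total candies = _
    rw [count_coins_inner, if_pos h]
    simp only [if_neg (by omega : ¬ PySem.Int.floordiv total 3 < k)]
    rw [count_coins_inner, if_neg (by omega : ¬ 3 * k ≤ PySem.Int.mod total 3), if_pos h]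
  · show count_coins_inner k (1 + 1) total candies = _
    rw [count_coins_inner, if_neg h, if_neg h]

theorem A_run (n k a m : Int) (hk : 1 ≤ k) :
    ∀ (fuel : Nat) (seed coins total candies : Int),
      crun k a m (n - candies) seed total < (fuel : Int) →
      count_coins_loop n k a m fuel seed coins total candies =
        coins + crun k a m (n - candies) seed total := by
  intro fuel
  induction fuel with
  | zero =>
    intro seed coins total candies hf
    have := crun_nonneg k a m (n - candies) seed total
    omega
  | succ f ih =>
    intro seed coins total candies hf
    by_cases hc : candies < n
    · rw [count_coins_loop, if_pos hc]
      simp only [count_coins_lcg]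
      rw [show PySem.Int.mod (|PySem.Int.mod (PySem.Int.mod (a * seed + 11) m) 3 - 1| * 5 +
            |PySem.Int.mod (PySem.Int.mod (a * seed + 11) m) 3| * 2) 8 =
          pcoin (PySem.Int.mod (a * seed + 11) m) from rfl]
      rw [innerA k _ _ hk]
      rw [crun] at hf ⊢
      rw [if_neg (by omega : ¬ n - candies ≤ 0), if_neg (by omega : ¬ k ≤ 0)] at hf ⊢
      by_cases hp : 3 * k ≤ total + pcoin (PySem.Int.mod (a * seed + 11) m)
      · rw [if_pos hp] at hf ⊢
        simp only [if_pos hp]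
        have harg : n - (candies + PySem.Int.floordiv (total + pcoin (PySem.Int.mod (a * seed + 11) m)) 3)
            = n - candies - PySem.Int.floordiv (total + pcoin (PySem.Int.mod (a * seed + 11) m)) 3 := by ring
        rw [ih _ _ _ _ (by rw [harg]; omega), harg]
        omega
      · rw [if_neg hp] at hf ⊢
        simp only [if_neg hp]
        rw [ih _ _ _ _ (by omega)]
        omega
    · rw [count_coins_loop, if_neg hc]
      rw [crun, if_pos (by omega : n - candies ≤ 0)]
      omega

theorem B_final_run (n k a m : Int) (hk : 1 ≤ k) :
    ∀ (fuel : Nat) (seed coins t candies : Int),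
      crun k a m (n - candies) seed t < (fuel : Int) →
      count_coins_alt_final n k a m fuel seed coins t candies =
        coins + crun k a m (n - candies) seed t := by
  intro fuel
  induction fuel with
  | zero =>
    intro seed coins t candies hf
    have := crun_nonneg k a m (n - candies) seed t
    omega
  | succ f ih =>
    intro seed coins t candies hf
    by_cases hc : candies < n
    · rw [count_coins_alt_final, if_pos hc]
      simp only [pcoin_lookup]
      rw [crun] at hf ⊢
      rw [if_neg (by omega : ¬ n - candies ≤ 0), if_neg (by omega : ¬ k ≤ 0)] at hf ⊢
      by_cases hp : 3 * k ≤ t + pcoin (PySem.Int.mod (a * seed + 11) m)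
      · rw [if_pos hp] at hf ⊢
        simp only [if_pos hp]
        have harg : n - (candies + PySem.Int.floordiv (t + pcoin (PySem.Int.mod (a * seed + 11) m)) 3)
            = n - candies - PySem.Int.floordiv (t + pcoin (PySem.Int.mod (a * seed + 11) m)) 3 := by ring
        rw [ih _ _ _ _ (by rw [harg]; omega), harg]
        omega
      · rw [if_neg hp] at hf ⊢
        simp only [if_neg hp]
        rw [ih _ _ _ _ (by omega)]
        omega
    · rw [count_coins_alt_final, if_neg hc]
      rw [crun, if_pos (by omega : n - candies ≤ 0)]
      omega

theorem macroStep_spec (k a m : Int) (hk : 1 ≤ k) :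
    ∀ (fuel : Nat) (seed coins t candies : Int),
      0 ≤ t → (3 * k - t).toNat < fuel →
      (coins < (count_coins_alt_macroStep k a m fuel seed coins t candies).2.1) ∧
      (candies + k ≤ (count_coins_alt_macroStep k a m fuel seed coins t candies).2.2.2) ∧
      (0 ≤ (count_coins_alt_macroStep k a m fuel seed coins t candies).2.2.1) ∧
      ((count_coins_alt_macroStep k a m fuel seed coins t candies).2.2.1 < 3) ∧
      (∀ needed : Int, 1 ≤ needed →
        crun k a m needed seed t =
          ((count_coins_alt_macroStep k a m fuel seed coins t candies).2.1 - coins) +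
            crun k a m
              (needed - ((count_coins_alt_macroStep k a m fuel seed coins t candies).2.2.2 - candies))
              (count_coins_alt_macroStep k a m fuel seed coins t candies).1
              (count_coins_alt_macroStep k a m fuel seed coins t candies).2.2.1) := by
  intro fuel
  induction fuel with
  | zero => intro seed coins t candies h0 hf; omega
  | succ f ih =>
    intro seed coins t candies h0 hf
    have hp := pcoin_bounds (PySem.Int.mod (a * seed + 11) m)
    rw [count_coins_alt_macroStep]
    simp only [pcoin_lookup]
    by_cases hpc : 3 * k ≤ t + pcoin (PySem.Int.mod (a * seed + 11) m)
    · simp only [if_pos hpc]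
      have hb : k ≤ PySem.Int.floordiv (t + pcoin (PySem.Int.mod (a * seed + 11) m)) 3 :=
        (PySem.Int.le_floordiv_iff_mul_le (by norm_num)).2 (by omega)
      have hm0 : 0 ≤ PySem.Int.mod (t + pcoin (PySem.Int.mod (a * seed + 11) m)) 3 :=
        PySem.Int.mod_nonneg _ (by norm_num)
      have hm3 : PySem.Int.mod (t + pcoin (PySem.Int.mod (a * seed + 11) m)) 3 < 3 :=
        PySem.Int.mod_lt _ (by norm_num)
      refine ⟨by omega, by omega, hm0, hm3, ?_⟩
      intro needed hn
      rw [crun, if_neg (by omega : ¬ needed ≤ 0), if_neg (by omega : ¬ k ≤ 0), if_pos hpc]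
      have harg : needed - (candies + PySem.Int.floordiv (t + pcoin (PySem.Int.mod (a * seed + 11) m)) 3 - candies)
          = needed - PySem.Int.floordiv (t + pcoin (PySem.Int.mod (a * seed + 11) m)) 3 := by ring
      rw [harg]
      omega
    · simp only [if_neg hpc]
      obtain ⟨ih1, ih2, ih3, ih4, ih5⟩ :=
        ih (PySem.Int.mod (a * seed + 11) m) (coins + 1)
          (t + pcoin (PySem.Int.mod (a * seed + 11) m)) candies (by omega) (by omega)
      refine ⟨by omega, by omega, ih3, ih4, ?_⟩
      intro needed hn
      rw [crun, if_neg (by omega : ¬ needed ≤ 0), if_neg (by omega : ¬ k ≤ 0), if_neg hpc]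
      rw [ih5 needed hn]
      omega

theorem crun_cycle (k a m seed t dc dd : Int) (hdd : 1 ≤ dd)
    (h : ∀ x : Int, dd < x → crun k a m x seed t = dc + crun k a m (x - dd) seed t) :
    ∀ (j : Nat) (x : Int), (j : Int) * dd < x →
      crun k a m x seed t = (j : Int) * dc + crun k a m (x - (j : Int) * dd) seed t := by
  intro j
  induction j with
  | zero => intro x hx; norm_num
  | succ j ihj =>
    intro x hx
    have hj0 : (0 : Int) ≤ (j : Int) * dd := by positivity
    have hxj : ((j : Int) + 1) * dd < x := by push_cast at hx; linarith
    have hdx : dd < x := by nlinarith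
    rw [h x hdx]
    rw [ihj (x - dd) (by nlinarith)]
    have harg : x - dd - (j : Int) * dd = x - ((j : Nat) + 1 : Int) * dd := by ring
    rw [harg]
    push_cast
    ring

-- loop invariant for the 'seen' dict: every stored entry (key ↦ (c0, d0)) lies strictly in the
-- past of the current state, and the simulation from key to the current state is pinned down
def SeenInv (k a m : Int) (seen : PySem.Dict (Int × Int) (Int × Int))
    (seed coins t candies : Int) : Prop :=
  ∀ key c0 d0, seen.get? key = some (c0, d0) →
    d0 < candies ∧
    ∀ x : Int, candies - d0 < x →
      crun k a m x key.1 key.2 =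
        (coins - c0) + crun k a m (x - (candies - d0)) seed t

theorem macro_run (n k a m : Int) (hk : 1 ≤ k) :
    ∀ (fuel : Nat) (seen : PySem.Dict (Int × Int) (Int × Int)) (seed coins t candies : Int),
      0 ≤ t → t < 3 * k → 0 ≤ candies → n - candies < (fuel : Int) →
      SeenInv k a m seen seed coins t candies →
      count_coins_alt_macro n k a m fuel seen seed coins t candies =
        coins + crun k a m (n - candies) seed t := by
  intro fuel
  induction fuel with
  | zero =>
    intro seen seed coins t candies h0 h3k hcand hf hinv
    rw [count_coins_alt_macro, crun, if_pos (by omega : n - candies ≤ 0)]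
    omega
  | succ f ih =>
    intro seen seed coins t candies h0 h3k hcand hf hinv
    by_cases hc : candies < n
    · rw [count_coins_alt_macro, if_pos hc]
      cases hget : seen.get? (seed, t) with
      | some cd =>
        simp only []
        obtain ⟨hd0, hrel⟩ := hinv (seed, t) cd.1 cd.2 (by simpa using hget)
        have hdd1 : 1 ≤ candies - cd.2 := by omega
        set dd := candies - cd.2 with hdd_def
        set dc := coins - cd.1 with hdc_def
        set j := PySem.Int.floordiv (n - candies - 1) dd with hj_def
        have hj0 : 0 ≤ j := by
          rw [hj_def]
          exact (PySem.Int.le_floordiv_iff_mul_le (by omega)).2 (by omega)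
        have hjle : j * dd ≤ n - candies - 1 := by
          have heq := PySem.Int.floordiv_mul_add_mod (n - candies - 1) dd
          have hm0 : 0 ≤ PySem.Int.mod (n - candies - 1) dd := PySem.Int.mod_nonneg _ (by omega)
          rw [← hj_def] at heq
          linarith
        have hjnat : ((j.toNat : Int)) = j := Int.toNat_of_nonneg hj0
        have hmain := crun_cycle k a m seed t dc dd hdd1
          (fun x hx => hrel x hx) j.toNat (n - candies) (by rw [hjnat]; linarith)
        rw [hjnat] at hmain
        have hq0 : 0 ≤ j * dd := mul_nonneg hj0 (by omega)
        set q := j * dd with hq_def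
        rw [B_final_run n k a m hk _ seed _ t _ ?_]
        · have harg : n - (candies + q) = n - candies - q := by ring
          rw [harg, hmain]
          linarith
        · -- fuel bound for the final loop
          have hb := crun_le k a m (n - (candies + q)) seed t hk h0 h3k
          have hnn := crun_nonneg k a m (n - (candies + q)) seed t
          split_ifs at hb <;> omega
      | none =>
        simp only []
        obtain ⟨hsc, hsd, hst0, hst3, hsrel⟩ :=
          macroStep_spec k a m hk (3 * k + 3).toNat seed coins t candies h0 (by omega)
        set r := count_coins_alt_macroStep k a m (3 * k + 3).toNat seed coins t candies with hr
        rw [ih (seen.insert (seed, t) (coins, candies)) r.1 r.2.1 r.2.2.1 r.2.2.2 hst0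
          (by omega) (by omega) (by omega) ?_]
        · rw [hsrel (n - candies) (by omega)]
          have harg : n - r.2.2.2 = n - candies - (r.2.2.2 - candies) := by ring
          rw [harg]
          ring
        · intro key c0 d0 hkey
          rw [PySem.Dict.get?_insert] at hkey
          split_ifs at hkey with hkeq
          · simp only [Option.some.injEq, Prod.mk.injEq] at hkey
            obtain ⟨hc0, hd0⟩ := hkey
            subst hc0; subst hd0
            refine ⟨by omega, ?_⟩
            intro x hx
            rw [hkeq]
            exact hsrel x (by omega)
          · obtain ⟨hold1, hold2⟩ := hinv key c0 d0 hkey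
            refine ⟨by omega, ?_⟩
            intro x hx
            rw [hold2 x (by omega)]
            rw [hsrel (x - (candies - d0)) (by omega)]
            have harg : x - (candies - d0) - (r.2.2.2 - candies) = x - (r.2.2.2 - d0) := by ring
            rw [harg]
            ring
    · rw [count_coins_alt_macro, if_neg hc, crun, if_pos (by omega : n - candies ≤ 0)]
      omega

-- ===== VERDICT (by name: the statement is the Claim_ definition above) =====
theorem count_coins_spec : Claim_equal_count_coins := by
  intro n k a m hdom hpre
  unfold Spec_count_coins
  rcases hpre with hn | ⟨hk, hm⟩
  · -- n ≤ 0: both loops exit at once with coins = 0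
    rw [count_coins, count_coins_alt, count_coins_loop, count_coins_alt_macro,
      if_neg (by omega : ¬ (0 : Int) < n), if_neg (by omega : ¬ (0 : Int) < n)]
  · have hbound := crun_le k a m n 0 0 hk le_rfl (by omega)
    have hnn := crun_nonneg k a m n 0 0
    have hA := A_run n k a m hk ((3 * (n + k) + 3).toNat + 1) 0 0 0 0
      (by rw [show n - 0 = n from by ring]; split_ifs at hbound <;> omega)
    have hB := macro_run n k a m hk (n.toNat + 1) PySem.Dict.empty 0 0 0 0 le_rfl (by omega)
      le_rfl (by omega)
      (by intro key c0 d0 hkey; rw [PySem.Dict.get?_empty] at hkey; cases hkey)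
    rw [count_coins, count_coins_alt, hA, hB]
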